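-- pv_equiv track=rewrite | github.com/cunananm2000/TicTacToeBot | TicTacToeBot.py | stringToState
-- ===== SOURCE A (Python) =====
-- def stringToState(string):
--     state = 0
--     for i in range(9):
--         if string[i] == 'X':
--             state = 3 * state + 1
--         elif string[i] == 'O':
--             state = 3 * state + 2
--         else:
--             state = 3 * state
--     return state
-- ===== SOURCE B (Python) =====
-- def stringToState(string):
--     digits = {'X': 1, 'O': 2}
--     return sum(digits.get(string[i], 0) * 3 ** (8 - i) for i in range(9))
-- ===== Notes on version B (the rewrite author's own statement) =====
-- stated objective: alternative
-- what changed: Replaced the Horner-style accumulator loop by a direct positional weighted sum: each of the nine characters is mapped to its base-3 digit via a dict lookup and multiplied by its place value 3**(8-i).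
import Mathlib
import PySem

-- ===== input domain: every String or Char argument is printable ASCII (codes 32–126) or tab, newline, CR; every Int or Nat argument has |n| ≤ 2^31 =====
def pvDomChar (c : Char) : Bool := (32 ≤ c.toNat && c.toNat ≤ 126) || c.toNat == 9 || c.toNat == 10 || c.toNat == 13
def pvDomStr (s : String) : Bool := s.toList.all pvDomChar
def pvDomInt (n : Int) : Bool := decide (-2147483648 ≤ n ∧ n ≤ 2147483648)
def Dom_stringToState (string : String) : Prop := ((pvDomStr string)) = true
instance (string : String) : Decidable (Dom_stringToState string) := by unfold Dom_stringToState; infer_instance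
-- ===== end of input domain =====

-- B replaces A's Horner accumulator loop with a positional weighted sum (digit * 3^(8-i)); objective: alternative decomposition.

-- ===== PORT A =====
-- Horner loop over range(9); string[i] out of range is an IndexError, excluded by Pre_ (the 'none' arm is unreachable there).
def stringToState (string : String) : Int :=
  (PySem.List.pyRange 0 9 1).foldl
    (fun state i =>
      match PySem.Str.pyGet? string i with
      | some c => if c = 'X' then 3 * state + 1 else if c = 'O' then 3 * state + 2 else 3 * state
      | none => 0)
    0

-- ===== PORT B =====
-- digits.get(string[i], 0): dict lookup as an association-list lookup with default 0
def pvDigit (c : Char) : Int := PySem.Dict.getD (PySem.Dict.ofList [('X', (1 : Int)), ('O', 2)]) c 0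
def stringToState_alt (string : String) : Int :=
  ((PySem.List.pyRange 0 9 1).map
    (fun i =>
      match PySem.Str.pyGet? string i with
      | some c => pvDigit c * 3 ^ (8 - i).toNat
      | none => 0)).sum

-- ===== PRECONDITION & SPEC =====
-- Pre_ excludes exactly the strings shorter than 9 characters, on which Python A raises IndexError (B raises there too).
def Pre_stringToState (string : String) : Prop := 9 ≤ string.toList.length
instance (string : String) : Decidable (Pre_stringToState string) := by unfold Pre_stringToState; infer_instance
def pvWitness_stringToState : String := "XO X O XO"
def Spec_stringToState (string : String) (out : Int) : Prop := out = stringToState_alt string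
instance (string : String) (out : Int) : Decidable (Spec_stringToState string out) := by unfold Spec_stringToState; infer_instance

-- ===== CLAIM (what is proved, stated in full; the proofs are below) =====
def Claim_equal_stringToState : Prop := ∀ (string : String), Dom_stringToState string → Pre_stringToState string → Spec_stringToState string (stringToState string)

-- ===== LEMMAS AND PROOFS =====
lemma pvDigit_eq (c : Char) : pvDigit c = if c = 'X' then 1 else if c = 'O' then 2 else 0 := by
  have hd : PySem.Dict.ofList [('X', (1 : Int)), ('O', 2)] = PySem.Dict.mk [('X', 1), ('O', 2)] := by
    decide
  simp [pvDigit, PySem.Dict.getD, hd, PySem.Dict.get?_mk_cons]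
  split_ifs <;> first | rfl | (subst c; simp_all)

-- A's branch at one position equals "3*state + digit", the shape B sums directly
lemma pvStep_eq (c : Char) (s : Int) :
    (if c = 'X' then 3 * s + 1 else if c = 'O' then 3 * s + 2 else 3 * s) = 3 * s + pvDigit c := by
  rw [pvDigit_eq]; split_ifs <;> ring

-- ===== VERDICT (by name: the statement is the Claim_ definition above) =====
theorem stringToState_spec : Claim_equal_stringToState := by
  intro string _ hpre
  unfold Spec_stringToState stringToState stringToState_alt Pre_stringToState at *
  obtain ⟨l, rfl⟩ : ∃ l, string = String.ofList l := ⟨string.toList, by simp⟩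
  rcases l with _|⟨c0,_|⟨c1,_|⟨c2,_|⟨c3,_|⟨c4,_|⟨c5,_|⟨c6,_|⟨c7,_|⟨c8,rest⟩⟩⟩⟩⟩⟩⟩⟩⟩ <;>
    try (exfalso;
         simp only [String.toList_ofList, List.length_cons, List.length_nil] at hpre; omega)
  have hr : PySem.List.pyRange 0 9 1 = [(0 : Int), 1, 2, 3, 4, 5, 6, 7, 8] := by decide
  have g0 : PySem.Str.pyGet? (String.ofList (c0::c1::c2::c3::c4::c5::c6::c7::c8::rest)) 0 = some c0 := by
    rw [show (0 : Int) = ((0 : Nat) : Int) from by norm_num, PySem.Str.pyGet?_natCast,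
      String.toList_ofList]
    rfl
  have g1 : PySem.Str.pyGet? (String.ofList (c0::c1::c2::c3::c4::c5::c6::c7::c8::rest)) 1 = some c1 := by
    rw [show (1 : Int) = ((1 : Nat) : Int) from by norm_num, PySem.Str.pyGet?_natCast,
      String.toList_ofList]
    rfl
  have g2 : PySem.Str.pyGet? (String.ofList (c0::c1::c2::c3::c4::c5::c6::c7::c8::rest)) 2 = some c2 := by
    rw [show (2 : Int) = ((2 : Nat) : Int) from by norm_num, PySem.Str.pyGet?_natCast,
      String.toList_ofList]
    rfl
  have g3 : PySem.Str.pyGet? (String.ofList (c0::c1::c2::c3::c4::c5::c6::c7::c8::rest)) 3 = some c3 := by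
    rw [show (3 : Int) = ((3 : Nat) : Int) from by norm_num, PySem.Str.pyGet?_natCast,
      String.toList_ofList]
    rfl
  have g4 : PySem.Str.pyGet? (String.ofList (c0::c1::c2::c3::c4::c5::c6::c7::c8::rest)) 4 = some c4 := by
    rw [show (4 : Int) = ((4 : Nat) : Int) from by norm_num, PySem.Str.pyGet?_natCast,
      String.toList_ofList]
    rfl
  have g5 : PySem.Str.pyGet? (String.ofList (c0::c1::c2::c3::c4::c5::c6::c7::c8::rest)) 5 = some c5 := by
    rw [show (5 : Int) = ((5 : Nat) : Int) from by norm_num, PySem.Str.pyGet?_natCast,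
      String.toList_ofList]
    rfl
  have g6 : PySem.Str.pyGet? (String.ofList (c0::c1::c2::c3::c4::c5::c6::c7::c8::rest)) 6 = some c6 := by
    rw [show (6 : Int) = ((6 : Nat) : Int) from by norm_num, PySem.Str.pyGet?_natCast,
      String.toList_ofList]
    rfl
  have g7 : PySem.Str.pyGet? (String.ofList (c0::c1::c2::c3::c4::c5::c6::c7::c8::rest)) 7 = some c7 := by
    rw [show (7 : Int) = ((7 : Nat) : Int) from by norm_num, PySem.Str.pyGet?_natCast,
      String.toList_ofList]
    rfl
  have g8 : PySem.Str.pyGet? (String.ofList (c0::c1::c2::c3::c4::c5::c6::c7::c8::rest)) 8 = some c8 := by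
    rw [show (8 : Int) = ((8 : Nat) : Int) from by norm_num, PySem.Str.pyGet?_natCast,
      String.toList_ofList]
    rfl
  simp only [hr, List.foldl_cons, List.foldl_nil, List.map_cons, List.map_nil,
    List.sum_cons, List.sum_nil, pvStep_eq, g0, g1, g2, g3, g4, g5, g6, g7, g8]
  norm_num [Int.toNat]
  ring
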